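-- pv_equiv track=rewrite | github.com/birodavidjanos/szkriptnyelvek | óra3/csodalatos_elme.py | dekodolas
-- ===== SOURCE A (Python) =====
-- def dekodolas(text):
--     """Egyszerű leet dekódolás replace() segítségével"""
--     szotar = {
--         '4': 'A', '5': 'S', '0': 'O', '1': 'I',
--         '3': 'E', '7': 'T', '2': 'Z', '6': 'G', '8': 'B'
--     }
--
--     for k, v in szotar.items():
--         text = text.replace(k, v)
--
--     return text
-- ===== SOURCE B (Python) =====
-- def dekodolas(text):
--     """Egyszerű leet dekódolás: egyetlen menet a karaktereken, dict lookuppal"""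
--     szotar = {
--         '4': 'A', '5': 'S', '0': 'O', '1': 'I',
--         '3': 'E', '7': 'T', '2': 'Z', '6': 'G', '8': 'B'
--     }
--     return ''.join(szotar.get(c, c) for c in text)
-- ===== Notes on version B (the rewrite author's own statement) =====
-- stated objective: alternative
-- what changed: Replaces nine whole-string replace() passes with a single pass over the characters using one dict lookup per character; asymptotically the same O(n), and in CPython the C-level replace passes are in fact faster, so no speed is claimed.
import Mathlib
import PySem

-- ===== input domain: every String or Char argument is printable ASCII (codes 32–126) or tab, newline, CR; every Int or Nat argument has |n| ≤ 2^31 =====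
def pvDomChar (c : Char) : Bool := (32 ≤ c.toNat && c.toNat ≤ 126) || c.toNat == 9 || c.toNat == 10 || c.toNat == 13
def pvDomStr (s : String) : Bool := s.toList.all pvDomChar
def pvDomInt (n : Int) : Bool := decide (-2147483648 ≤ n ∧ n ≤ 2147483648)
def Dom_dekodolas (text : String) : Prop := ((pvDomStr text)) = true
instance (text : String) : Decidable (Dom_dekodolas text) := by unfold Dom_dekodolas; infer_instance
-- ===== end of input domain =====

-- B replaces A's nine whole-string replace() passes by a single pass with a per-character dict lookup (objective: alternative decomposition; no speed claimed).

-- ===== PORT A =====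
-- A's dict, as an insertion-ordered association list (items iterated by the loop)
def szotarA : PySem.Dict String String :=
  PySem.Dict.ofList [("4", "A"), ("5", "S"), ("0", "O"), ("1", "I"),
                     ("3", "E"), ("7", "T"), ("2", "Z"), ("6", "G"), ("8", "B")]

def dekodolas (text : String) : String :=
  szotarA.items.foldl (fun t kv => PySem.Str.replace t kv.1 kv.2) text

-- ===== PORT B =====
def szotarB : PySem.Dict Char Char :=
  PySem.Dict.ofList [('4', 'A'), ('5', 'S'), ('0', 'O'), ('1', 'I'),
                     ('3', 'E'), ('7', 'T'), ('2', 'Z'), ('6', 'G'), ('8', 'B')]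

def dekodolas_alt (text : String) : String :=
  String.ofList (text.toList.map (fun c => szotarB.getD c c))

-- ===== PRECONDITION & SPEC =====
def Spec_dekodolas (text : String) (out : String) : Prop := out = dekodolas_alt text
instance (text : String) (out : String) : Decidable (Spec_dekodolas text out) := by unfold Spec_dekodolas; infer_instance

-- ===== CLAIM (what is proved, stated in full; the proofs are below) =====
def Claim_equal_dekodolas : Prop := ∀ (text : String), Dom_dekodolas text → Spec_dekodolas text (dekodolas text)

-- ===== LEMMAS AND PROOFS =====

-- single-character replace is a map over the characters
theorem replace_go_single (k v : Char) (l acc : List Char) (fuel : Nat) (h : l.length ≤ fuel) :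
    PySem.Chars.replace.go [k] [v] fuel l acc =
      acc.reverse ++ l.map (fun c => if c = k then v else c) := by
  induction l generalizing fuel acc with
  | nil => cases fuel <;> simp [PySem.Chars.replace.go]
  | cons c t ih =>
    cases fuel with
    | zero => simp at h
    | succ n =>
      by_cases hc : k = c
      · subst hc
        rw [show PySem.Chars.replace.go [k] [v] (n + 1) (k :: t) acc
              = PySem.Chars.replace.go [k] [v] n t ([v].reverse ++ acc) from by
            simp [PySem.Chars.replace.go, List.isPrefixOf]]
        rw [ih _ _ (by simpa using h)]
        simp
      · rw [show PySem.Chars.replace.go [k] [v] (n + 1) (c :: t) acc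
              = PySem.Chars.replace.go [k] [v] n t (c :: acc) from by
            simp [PySem.Chars.replace.go, List.isPrefixOf, beq_iff_eq, hc]]
        rw [ih _ _ (by simpa using h)]
        simp
        exact fun hh => absurd hh.symm hc

theorem replace_single (k v : Char) (l : List Char) :
    PySem.Chars.replace l [k] [v] = l.map (fun c => if c = k then v else c) := by
  simp [PySem.Chars.replace, replace_go_single k v l [] l.length le_rfl]

set_option maxHeartbeats 1000000 in
theorem dekodolas_spec : Claim_equal_dekodolas := by
  unfold Claim_equal_dekodolas
  intro text _
  unfold Spec_dekodolas dekodolas dekodolas_alt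
  have hA : szotarA.items = [("4", "A"), ("5", "S"), ("0", "O"), ("1", "I"),
      ("3", "E"), ("7", "T"), ("2", "Z"), ("6", "G"), ("8", "B")] := by rfl
  rw [hA]
  simp only [List.foldl, PySem.Str.replace,
    show ("4" : String).toList = ['4'] from rfl, show ("A" : String).toList = ['A'] from rfl,
    show ("5" : String).toList = ['5'] from rfl, show ("S" : String).toList = ['S'] from rfl,
    show ("0" : String).toList = ['0'] from rfl, show ("O" : String).toList = ['O'] from rfl,
    show ("1" : String).toList = ['1'] from rfl, show ("I" : String).toList = ['I'] from rfl,
    show ("3" : String).toList = ['3'] from rfl, show ("E" : String).toList = ['E'] from rfl,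
    show ("7" : String).toList = ['7'] from rfl, show ("T" : String).toList = ['T'] from rfl,
    show ("2" : String).toList = ['2'] from rfl, show ("Z" : String).toList = ['Z'] from rfl,
    show ("6" : String).toList = ['6'] from rfl, show ("8" : String).toList = ['8'] from rfl,
    show ("G" : String).toList = ['G'] from rfl, show ("B" : String).toList = ['B'] from rfl,
    replace_single, String.toList_ofList, List.map_map]
  refine congrArg String.ofList ?_
  apply List.map_congr_left
  intro c _
  by_cases h4 : c = '4'; · subst h4; decide
  by_cases h5 : c = '5'; · subst h5; decide
  by_cases h0 : c = '0'; · subst h0; decide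
  by_cases h1 : c = '1'; · subst h1; decide
  by_cases h3 : c = '3'; · subst h3; decide
  by_cases h7 : c = '7'; · subst h7; decide
  by_cases h2 : c = '2'; · subst h2; decide
  by_cases h6 : c = '6'; · subst h6; decide
  by_cases h8 : c = '8'; · subst h8; decide
  have hB : szotarB.items = [('4', 'A'), ('5', 'S'), ('0', 'O'), ('1', 'I'),
      ('3', 'E'), ('7', 'T'), ('2', 'Z'), ('6', 'G'), ('8', 'B')] := by rfl
  have f4 : ('4' == c) = false := beq_eq_false_iff_ne.mpr (Ne.symm h4)
  have f5 : ('5' == c) = false := beq_eq_false_iff_ne.mpr (Ne.symm h5)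
  have f0 : ('0' == c) = false := beq_eq_false_iff_ne.mpr (Ne.symm h0)
  have f1 : ('1' == c) = false := beq_eq_false_iff_ne.mpr (Ne.symm h1)
  have f3 : ('3' == c) = false := beq_eq_false_iff_ne.mpr (Ne.symm h3)
  have f7 : ('7' == c) = false := beq_eq_false_iff_ne.mpr (Ne.symm h7)
  have f2 : ('2' == c) = false := beq_eq_false_iff_ne.mpr (Ne.symm h2)
  have f6 : ('6' == c) = false := beq_eq_false_iff_ne.mpr (Ne.symm h6)
  have f8 : ('8' == c) = false := beq_eq_false_iff_ne.mpr (Ne.symm h8)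
  simp [PySem.Dict.getD, PySem.Dict.get?, hB, List.find?, Function.comp,
    h4, h5, h0, h1, h3, h7, h2, h6, h8, f4, f5, f0, f1, f3, f7, f2, f6, f8]
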